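-- pv_equiv track=rewrite | github.com/stgleb/dynamic_programming | pick_up_coin_game.py | pick_up_dp
-- ===== SOURCE A (Python) =====
-- def pick_up_dp(coins):
--     n = len(coins)
--     dp = [[0 for _ in range(n)] for _ in range(n)]
--     for i in range(n):
--         dp[i][i] = coins[i]
--         if i < n - 1:
--             dp[i][i + 1] = max(coins[i], coins[i + 1])
--
--     j = 2
--     turn = True
--     while j < n:
--         i = 0
--         k = j
--         turn = not turn
--         while k < n:
--             if turn:
--                 dp[i][k] = max(dp[i + 1][k] + coins[i], dp[i][k - 1] + coins[k])
--             else: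
--                 dp[i][k] = min(dp[i + 1][k], dp[i][k - 1])
--             i += 1
--             k += 1
--         j += 1
--     return dp[0][n - 1]
-- ===== SOURCE B (Python) =====
-- def pick_up_dp(coins):
--     n = len(coins)
--     cache = {}
--
--     def f(i, k):
--         if (i, k) in cache:
--             return cache[(i, k)]
--         if i == k:
--             v = coins[i]
--         elif k == i + 1:
--             v = max(coins[i], coins[k])
--         elif (k - i) % 2 == 1:
--             v = max(f(i + 1, k) + coins[i], f(i, k - 1) + coins[k])
--         else:
--             v = min(f(i + 1, k), f(i, k - 1))
--         cache[(i, k)] = v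
--         return v
--
--     # warm the cache by increasing interval length so recursion stays shallow
--     for j in range(2, n):
--         for i in range(n - j):
--             f(i, i + j)
--     return f(0, n - 1)
-- ===== Notes on version B (the rewrite author's own statement) =====
-- stated objective: alternative
-- what changed: Replaced the bottom-up 2D table with in-place diagonal sweeps and a flipping turn flag by a top-down memoized recursion f(i,k) over interval endpoints, deriving the turn from the parity of k-i (the memo dict is warmed by increasing interval length to keep recursion shallow).
import Mathlib
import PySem

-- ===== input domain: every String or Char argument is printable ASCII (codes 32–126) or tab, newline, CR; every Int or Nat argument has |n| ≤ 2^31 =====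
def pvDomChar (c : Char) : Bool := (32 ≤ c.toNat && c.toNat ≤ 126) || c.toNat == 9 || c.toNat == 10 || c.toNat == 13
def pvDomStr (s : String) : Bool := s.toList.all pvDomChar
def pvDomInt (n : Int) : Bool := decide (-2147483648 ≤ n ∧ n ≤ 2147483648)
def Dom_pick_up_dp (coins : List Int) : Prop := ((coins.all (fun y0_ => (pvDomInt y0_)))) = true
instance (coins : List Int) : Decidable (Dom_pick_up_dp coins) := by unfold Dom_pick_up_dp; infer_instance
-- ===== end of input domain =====

-- B replaces A's bottom-up 2D table with flipping turn flag by a top-down memoized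
-- recursion f(i,k) over interval endpoints, deriving the turn from the parity of k-i
-- (objective: alternative decomposition, same asymptotic cost).

-- ===== PORT A =====
-- dp[i][k] read/write on the list-of-lists table (indices are the loop counters, always in range on Pre_)
def pvGet2 (dp : List (List Int)) (i k : Nat) : Int := (dp.getD i []).getD k 0

def pvSet2 (dp : List (List Int)) (i k : Nat) (v : Int) : List (List Int) :=
  dp.set i ((dp.getD i []).set k v)

-- 'for i in range(n): dp[i][i] = coins[i]; if i < n-1: dp[i][i+1] = max(...)'
def pvInitA (coins : List Int) (n : Nat) (dp : List (List Int)) : List (List Int) :=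
  (List.range n).foldl (fun dp i =>
    let dp := pvSet2 dp i i (coins.getD i 0)
    if i < n - 1 then pvSet2 dp i (i + 1) (max (coins.getD i 0) (coins.getD (i + 1) 0)) else dp) dp

-- inner 'while k < n' loop (fuel bounds the remaining iterations, n is always enough)
def pvInnerA (coins : List Int) (n : Nat) (turn : Bool) :
    Nat → Nat → Nat → List (List Int) → List (List Int)
  | 0, _, _, dp => dp
  | fuel + 1, i, k, dp =>
    if k < n then
      pvInnerA coins n turn fuel (i + 1) (k + 1)
        (if turn then
          pvSet2 dp i k (max (pvGet2 dp (i + 1) k + coins.getD i 0)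
                             (pvGet2 dp i (k - 1) + coins.getD k 0))
        else
          pvSet2 dp i k (min (pvGet2 dp (i + 1) k) (pvGet2 dp i (k - 1))))
    else dp

-- outer 'while j < n' loop carrying the flipping turn flag
def pvOuterA (coins : List Int) (n : Nat) :
    Nat → Nat → Bool → List (List Int) → List (List Int)
  | 0, _, _, dp => dp
  | fuel + 1, j, turn, dp =>
    if j < n then
      pvOuterA coins n fuel (j + 1) (!turn) (pvInnerA coins n (!turn) n 0 j dp)
    else dp

def pick_up_dp (coins : List Int) : Int :=
  let n := coins.length
  let dp := List.replicate n (List.replicate n (0 : Int))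
  let dp := pvInitA coins n dp
  let dp := pvOuterA coins n n 2 true dp
  pvGet2 dp 0 (n - 1)

-- ===== PORT B =====
-- memoized top-down recursion; the cache dict is threaded through; fuel bounds the
-- recursion depth (interval length + 1, so n is always enough on Pre_)
def pvGoB (coins : List Int) :
    Nat → Nat → Nat → PySem.Dict (Nat × Nat) Int → Int × PySem.Dict (Nat × Nat) Int
  | 0, _, _, c => (0, c)
  | fuel + 1, i, k, c =>
    match c.get? (i, k) with
    | some v => (v, c)
    | none =>
      let p : Int × PySem.Dict (Nat × Nat) Int :=
        if i = k then (coins.getD i 0, c)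
        else if k = i + 1 then (max (coins.getD i 0) (coins.getD k 0), c)
        else if (k - i) % 2 = 1 then
          let q1 := pvGoB coins fuel (i + 1) k c
          let q2 := pvGoB coins fuel i (k - 1) q1.2
          (max (q1.1 + coins.getD i 0) (q2.1 + coins.getD k 0), q2.2)
        else
          let q1 := pvGoB coins fuel (i + 1) k c
          let q2 := pvGoB coins fuel i (k - 1) q1.2
          (min q1.1 q2.1, q2.2)
      (p.1, p.2.insert (i, k) p.1)

-- 'for j in range(2, n): for i in range(n - j): f(i, i + j)' — the warm-up loop
-- (range(2, n) is traversed as List.range (n-2) with j = j2 + 2; only the cache is kept)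
def pvWarmB (coins : List Int) (n : Nat) (c : PySem.Dict (Nat × Nat) Int) :
    PySem.Dict (Nat × Nat) Int :=
  (List.range (n - 2)).foldl (fun c j2 =>
    (List.range (n - (j2 + 2))).foldl (fun c i =>
      (pvGoB coins n i (i + (j2 + 2)) c).2) c) c

def pick_up_dp_alt (coins : List Int) : Int :=
  (pvGoB coins coins.length 0 (coins.length - 1)
    (pvWarmB coins coins.length PySem.Dict.empty)).1

-- ===== PRECONDITION & SPEC =====
-- Pre_ excludes only the empty list, on which A raises IndexError (and B raises RecursionError).
def Pre_pick_up_dp (coins : List Int) : Prop := coins ≠ []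
instance (coins : List Int) : Decidable (Pre_pick_up_dp coins) := by
  unfold Pre_pick_up_dp; infer_instance

def pvWitness_pick_up_dp : List Int := ([1, 5, 2, 3] : List Int)

def Spec_pick_up_dp (coins : List Int) (out : Int) : Prop := out = pick_up_dp_alt coins
instance (coins : List Int) (out : Int) : Decidable (Spec_pick_up_dp coins out) := by
  unfold Spec_pick_up_dp; infer_instance

-- ===== CLAIM (what is proved, stated in full; the proofs are below) =====
def Claim_equal_pick_up_dp : Prop :=
  ∀ (coins : List Int), Dom_pick_up_dp coins → Pre_pick_up_dp coins →
    Spec_pick_up_dp coins (pick_up_dp coins)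

-- ===== LEMMAS AND PROOFS =====
-- the common mathematical recurrence both programs compute
def pvG (coins : List Int) (i k : Nat) : Int :=
  if _h1 : k ≤ i then coins.getD i 0
  else if k = i + 1 then max (coins.getD i 0) (coins.getD k 0)
  else if (k - i) % 2 = 1 then
    max (pvG coins (i + 1) k + coins.getD i 0) (pvG coins i (k - 1) + coins.getD k 0)
  else
    min (pvG coins (i + 1) k) (pvG coins i (k - 1))
termination_by k - i
decreasing_by all_goals omega

-- ---- B side ----
def pvInvB (coins : List Int) (c : PySem.Dict (Nat × Nat) Int) : Prop :=
  ∀ i k v, c.get? (i, k) = some v → v = pvG coins i k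

theorem pvInvB_insert {coins : List Int} {c : PySem.Dict (Nat × Nat) Int} {i k : Nat} {v : Int}
    (h : pvInvB coins c) (hv : v = pvG coins i k) :
    pvInvB coins (c.insert (i, k) v) := by
  intro a b w hw
  rw [PySem.Dict.get?_insert] at hw
  split at hw
  · rename_i heq
    injection heq with ha hb
    subst ha; subst hb
    injection hw with hw
    omega
  · exact h a b w hw

theorem pvGoB_correct (coins : List Int) :
    ∀ fuel i k c, i ≤ k → k - i < fuel → pvInvB coins c →
      (pvGoB coins fuel i k c).1 = pvG coins i k ∧ pvInvB coins (pvGoB coins fuel i k c).2 := by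
  intro fuel
  induction fuel with
  | zero => intro i k c hik hlt hinv; omega
  | succ m ih =>
    intro i k c hik hlt hinv
    rw [pvGoB]
    cases hget : c.get? (i, k) with
    | some v => exact ⟨hinv i k v hget, hinv⟩
    | none =>
      by_cases h1 : i = k
      · subst h1
        simp only [if_true]
        have hv : coins.getD i 0 = pvG coins i i := by
          conv_rhs => rw [pvG]
          rw [dif_pos (le_refl i)]
        exact ⟨hv, pvInvB_insert hinv hv⟩
      · by_cases h2 : k = i + 1
        · simp only [if_neg h1, if_pos h2]
          have hv : max (coins.getD i 0) (coins.getD k 0) = pvG coins i k := by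
            conv_rhs => rw [pvG]
            rw [dif_neg (show ¬ k ≤ i by omega), if_pos h2]
          exact ⟨hv, pvInvB_insert hinv hv⟩
        · have hk2 : i + 2 ≤ k := by omega
          have H1 := ih (i + 1) k c (by omega) (by omega) hinv
          have H2 := ih i (k - 1) (pvGoB coins m (i + 1) k c).2 (by omega) (by omega) H1.2
          by_cases h3 : (k - i) % 2 = 1
          · simp only [if_neg h1, if_neg h2, if_pos h3]
            have hv : max ((pvGoB coins m (i + 1) k c).1 + coins.getD i 0)
                ((pvGoB coins m i (k - 1) (pvGoB coins m (i + 1) k c).2).1 + coins.getD k 0)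
                = pvG coins i k := by
              conv_rhs => rw [pvG]
              rw [dif_neg (show ¬ k ≤ i by omega), if_neg h2, if_pos h3, H1.1, H2.1]
            exact ⟨hv, pvInvB_insert H2.2 hv⟩
          · simp only [if_neg h1, if_neg h2, if_neg h3]
            have hv : min (pvGoB coins m (i + 1) k c).1
                (pvGoB coins m i (k - 1) (pvGoB coins m (i + 1) k c).2).1
                = pvG coins i k := by
              conv_rhs => rw [pvG]
              rw [dif_neg (show ¬ k ≤ i by omega), if_neg h2, if_neg h3, H1.1, H2.1]
            exact ⟨hv, pvInvB_insert H2.2 hv⟩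

theorem pvInvB_foldl {B : Type} (coins : List Int) (l : List B)
    (g : PySem.Dict (Nat × Nat) Int → B → PySem.Dict (Nat × Nat) Int)
    (h : ∀ c b, b ∈ l → pvInvB coins c → pvInvB coins (g c b)) :
    ∀ c, pvInvB coins c → pvInvB coins (l.foldl g c) := by
  induction l with
  | nil => exact fun c hc => hc
  | cons x xs ihx =>
    intro c hc
    rw [List.foldl_cons]
    exact ihx (fun c b hb => h c b (List.mem_cons_of_mem x hb))
      (g c x) (h c x (List.mem_cons_self) hc)

theorem pvWarmB_inv (coins : List Int) (n : Nat) (c : PySem.Dict (Nat × Nat) Int)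
    (hc : pvInvB coins c) : pvInvB coins (pvWarmB coins n c) := by
  unfold pvWarmB
  refine pvInvB_foldl coins _ _ ?_ c hc
  intro c j2 hj2 hcv
  have hj : j2 + 2 < n := by
    have := List.mem_range.1 hj2; omega
  refine pvInvB_foldl coins _ _ ?_ c hcv
  intro c i _ hcv
  exact (pvGoB_correct coins n i (i + (j2 + 2)) c (by omega) (by omega) hcv).2

-- ---- A side: table lemmas ----
def pvShape (n : Nat) (dp : List (List Int)) : Prop :=
  dp.length = n ∧ ∀ r ∈ dp, r.length = n

def pvFilled (coins : List Int) (n m : Nat) (dp : List (List Int)) : Prop :=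
  ∀ a b, a ≤ b → b < n → b - a < m → pvGet2 dp a b = pvG coins a b

theorem pvGetD_set_self {A : Type} (l : List A) (i : Nat) (a d : A) (h : i < l.length) :
    (l.set i a).getD i d = a := by
  rw [List.getD_eq_getElem?_getD, List.getElem?_set, if_pos rfl, if_pos h]; rfl

theorem pvGetD_set_ne {A : Type} (l : List A) (i j : Nat) (a d : A) (h : i ≠ j) :
    (l.set i a).getD j d = l.getD j d := by
  rw [List.getD_eq_getElem?_getD, List.getElem?_set, if_neg h, ← List.getD_eq_getElem?_getD]

theorem pvGet2_set2_self (dp : List (List Int)) (i k : Nat) (v : Int)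
    (hi : i < dp.length) (hk : k < (dp.getD i []).length) :
    pvGet2 (pvSet2 dp i k v) i k = v := by
  unfold pvGet2 pvSet2
  rw [pvGetD_set_self _ _ _ _ hi, pvGetD_set_self _ _ _ _ hk]

theorem pvGet2_set2_ne (dp : List (List Int)) (i k i' k' : Nat) (v : Int)
    (h : i' ≠ i ∨ k' ≠ k) :
    pvGet2 (pvSet2 dp i k v) i' k' = pvGet2 dp i' k' := by
  unfold pvGet2 pvSet2
  by_cases hii : i = i'
  · subst hii
    have hk' : k' ≠ k := by tauto
    by_cases hlen : i < dp.length
    · rw [pvGetD_set_self _ _ _ _ hlen, pvGetD_set_ne _ _ _ _ _ (by omega)]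
    · rw [List.set_eq_of_length_le (by omega)]
  · rw [pvGetD_set_ne _ _ _ _ _ (by omega)]

theorem pvShape_set2 {n : Nat} {dp : List (List Int)} (h : pvShape n dp)
    (i k : Nat) (v : Int) (hi : i < n) : pvShape n (pvSet2 dp i k v) := by
  obtain ⟨hlen, hrows⟩ := h
  constructor
  · simp [pvSet2, hlen]
  · intro r hr
    rcases List.mem_or_eq_of_mem_set hr with hmem | heq
    · exact hrows r hmem
    · subst heq
      rw [List.length_set]
      apply hrows
      rw [List.getD_eq_getElem?_getD, List.getElem?_eq_getElem (by omega)]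
      exact List.getElem_mem _

theorem pvRow_len {n : Nat} {dp : List (List Int)} (h : pvShape n dp) (i : Nat) (hi : i < n) :
    (dp.getD i []).length = n := by
  obtain ⟨hlen, hrows⟩ := h
  apply hrows
  rw [List.getD_eq_getElem?_getD, List.getElem?_eq_getElem (by omega)]
  exact List.getElem_mem _

-- ---- A side ----
def pvInitStep (coins : List Int) (n : Nat) (dp : List (List Int)) (i : Nat) : List (List Int) :=
  let dp := pvSet2 dp i i (coins.getD i 0)
  if i < n - 1 then pvSet2 dp i (i + 1) (max (coins.getD i 0) (coins.getD (i + 1) 0)) else dp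

theorem pvInit_aux (coins : List Int) (n : Nat) (dp0 : List (List Int)) (h0 : pvShape n dp0) :
    ∀ m, m ≤ n →
      pvShape n ((List.range m).foldl (pvInitStep coins n) dp0) ∧
      ∀ i, i < m →
        pvGet2 ((List.range m).foldl (pvInitStep coins n) dp0) i i = coins.getD i 0 ∧
        (i + 1 < n → pvGet2 ((List.range m).foldl (pvInitStep coins n) dp0) i (i + 1)
            = max (coins.getD i 0) (coins.getD (i + 1) 0)) := by
  intro m
  induction m with
  | zero => exact fun _ => ⟨h0, fun i hi => absurd hi (by omega)⟩
  | succ m ih =>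
    intro hm
    obtain ⟨hs, hv⟩ := ih (by omega)
    rw [List.range_succ, List.foldl_append, List.foldl_cons, List.foldl_nil]
    have hmn : m < n := by omega
    have hlen : ((List.range m).foldl (pvInitStep coins n) dp0).length = n := hs.1
    have hs1 : pvShape n (pvSet2 ((List.range m).foldl (pvInitStep coins n) dp0) m m
        (coins.getD m 0)) := pvShape_set2 hs _ _ _ hmn
    simp only [pvInitStep]
    by_cases hm1 : m < n - 1
    · rw [if_pos hm1]
      refine ⟨pvShape_set2 hs1 _ _ _ hmn, ?_⟩
      intro i hi
      by_cases him : i = m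
      · subst him
        constructor
        · rw [pvGet2_set2_ne _ _ _ _ _ _ (Or.inr (by omega)),
            pvGet2_set2_self _ _ _ _ (by omega) (by rw [pvRow_len hs i hmn]; omega)]
        · intro _
          rw [pvGet2_set2_self _ _ _ _ (by rw [hs1.1]; omega)
            (by rw [pvRow_len hs1 i hmn]; omega)]
      · have h1 := hv i (by omega)
        constructor
        · rw [pvGet2_set2_ne _ _ _ _ _ _ (Or.inl him),
            pvGet2_set2_ne _ _ _ _ _ _ (Or.inl him)]
          exact h1.1
        · intro hin
          rw [pvGet2_set2_ne _ _ _ _ _ _ (Or.inl him),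
            pvGet2_set2_ne _ _ _ _ _ _ (Or.inl him)]
          exact h1.2 hin
    · rw [if_neg hm1]
      refine ⟨hs1, ?_⟩
      intro i hi
      by_cases him : i = m
      · subst him
        constructor
        · rw [pvGet2_set2_self _ _ _ _ (by omega) (by rw [pvRow_len hs i hmn]; omega)]
        · intro hin; omega
      · have h1 := hv i (by omega)
        constructor
        · rw [pvGet2_set2_ne _ _ _ _ _ _ (Or.inl him)]; exact h1.1
        · intro hin
          rw [pvGet2_set2_ne _ _ _ _ _ _ (Or.inl him)]; exact h1.2 hin

theorem pvInit_correct (coins : List Int) (n : Nat) :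
    pvShape n (pvInitA coins n (List.replicate n (List.replicate n 0))) ∧
      pvFilled coins n 2 (pvInitA coins n (List.replicate n (List.replicate n 0))) := by
  have h0 : pvShape n (List.replicate n (List.replicate n (0 : Int))) := by
    constructor
    · simp
    · intro r hr
      rw [List.eq_of_mem_replicate hr]
      simp
  have H := pvInit_aux coins n _ h0 n (le_refl n)
  have heq : pvInitA coins n (List.replicate n (List.replicate n 0))
      = (List.range n).foldl (pvInitStep coins n) (List.replicate n (List.replicate n 0)) := rfl
  rw [heq]
  refine ⟨H.1, ?_⟩
  intro a b hab hbn hlt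
  have hcases : b = a ∨ b = a + 1 := by omega
  rcases hcases with h | h
  · subst h
    rw [(H.2 b (by omega)).1, pvG, dif_pos (le_refl b)]
  · subst h
    rw [(H.2 a (by omega)).2 (by omega)]
    conv_rhs => rw [pvG]
    rw [dif_neg (by omega), if_pos rfl]

theorem pvInner_correct (coins : List Int) (n j : Nat) (turn : Bool)
    (hj2 : 2 ≤ j) (ht : turn = decide (j % 2 = 1)) :
    ∀ fuel i k dp, k = i + j → n - k ≤ fuel → pvShape n dp →
      (∀ a b, a ≤ b → b < n → (b - a < j ∨ (b - a = j ∧ b < k)) → pvGet2 dp a b = pvG coins a b) →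
      pvShape n (pvInnerA coins n turn fuel i k dp) ∧
        pvFilled coins n (j + 1) (pvInnerA coins n turn fuel i k dp) := by
  intro fuel
  induction fuel with
  | zero =>
    intro i k dp hk hfuel hsh hinv
    refine ⟨hsh, ?_⟩
    intro a b hab hbn hlt
    rcases Nat.lt_or_ge (b - a) j with h | h
    · exact hinv a b hab hbn (Or.inl h)
    · exact hinv a b hab hbn (Or.inr ⟨by omega, by omega⟩)
  | succ fuel ih =>
    intro i k dp hk hfuel hsh hinv
    rw [pvInnerA]
    by_cases hkn : k < n
    · rw [if_pos hkn]
      have hi_n : i < n := by omega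
      have hA : pvGet2 dp (i + 1) k = pvG coins (i + 1) k :=
        hinv (i + 1) k (by omega) hkn (Or.inl (by omega))
      have hB : pvGet2 dp i (k - 1) = pvG coins i (k - 1) :=
        hinv i (k - 1) (by omega) (by omega) (Or.inl (by omega))
      have hGik : pvG coins i k =
          if j % 2 = 1 then
            max (pvG coins (i + 1) k + coins.getD i 0) (pvG coins i (k - 1) + coins.getD k 0)
          else min (pvG coins (i + 1) k) (pvG coins i (k - 1)) := by
        conv_lhs => rw [pvG]
        rw [dif_neg (by omega), if_neg (by omega)]
        have hkij : k - i = j := by omega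
        rw [hkij]
      have hnewinv : ∀ (val : Int), val = pvG coins i k →
          ∀ a b, a ≤ b → b < n → (b - a < j ∨ (b - a = j ∧ b < k + 1)) →
            pvGet2 (pvSet2 dp i k val) a b = pvG coins a b := by
        intro val hval a b hab hbn hcond
        by_cases hik : a = i ∧ b = k
        · obtain ⟨rfl, rfl⟩ := hik
          rw [pvGet2_set2_self _ _ _ _ (by rw [hsh.1]; omega)
            (by rw [pvRow_len hsh a hi_n]; omega), hval]
        · have hne : a ≠ i ∨ b ≠ k := by tauto
          rw [pvGet2_set2_ne _ _ _ _ _ _ hne]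
          rcases hcond with hc | ⟨hc1, hc2⟩
          · exact hinv a b hab hbn (Or.inl hc)
          · have hbk : b < k := by
              rcases Nat.lt_or_ge b k with h' | h'
              · exact h'
              · exfalso
                have hb : b = k := by omega
                have ha : a = i := by omega
                exact hik ⟨ha, hb⟩
            exact hinv a b hab hbn (Or.inr ⟨hc1, hbk⟩)
      by_cases hj : j % 2 = 1
      · have hturn : turn = true := by rw [ht]; simp [hj]
        rw [if_pos hturn]
        exact ih (i + 1) (k + 1) _ (by omega) (by omega) (pvShape_set2 hsh _ _ _ hi_n)
          (hnewinv (max (pvGet2 dp (i + 1) k + coins.getD i 0) (pvGet2 dp i (k - 1) + coins.getD k 0))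
            (by rw [hA, hB, hGik, if_pos hj]))
      · have hturn : turn = false := by rw [ht]; simp [hj]
        rw [if_neg (by simp [hturn])]
        exact ih (i + 1) (k + 1) _ (by omega) (by omega) (pvShape_set2 hsh _ _ _ hi_n)
          (hnewinv (min (pvGet2 dp (i + 1) k) (pvGet2 dp i (k - 1)))
            (by rw [hA, hB, hGik, if_neg hj]))
    · rw [if_neg hkn]
      refine ⟨hsh, ?_⟩
      intro a b hab hbn hlt
      rcases Nat.lt_or_ge (b - a) j with h | h
      · exact hinv a b hab hbn (Or.inl h)
      · exact hinv a b hab hbn (Or.inr ⟨by omega, by omega⟩)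

theorem pvOuter_correct (coins : List Int) (n : Nat) :
    ∀ fuel j turn dp, 2 ≤ j → turn = decide (j % 2 = 0) → n - j ≤ fuel →
      pvShape n dp → pvFilled coins n j dp →
      ∀ a b, a ≤ b → b < n → pvGet2 (pvOuterA coins n fuel j turn dp) a b = pvG coins a b := by
  intro fuel
  induction fuel with
  | zero =>
    intro j turn dp hj2 ht hfuel hsh hfill a b hab hbn
    rw [pvOuterA]
    exact hfill a b hab hbn (by omega)
  | succ fuel ih =>
    intro j turn dp hj2 ht hfuel hsh hfill
    rw [pvOuterA]
    by_cases hjn : j < n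
    · rw [if_pos hjn]
      have hturn' : (!turn) = decide (j % 2 = 1) := by
        rw [ht]
        rcases Nat.mod_two_eq_zero_or_one j with h | h <;> simp [h]
      have HI := pvInner_correct coins n j (!turn) hj2 hturn' n 0 j dp (by omega) (by omega) hsh
        (by
          intro a b hab hbn hc
          rcases hc with hc | ⟨hc1, hc2⟩
          · exact hfill a b hab hbn hc
          · exact absurd hc2 (by omega))
      exact ih (j + 1) (!turn) _ (by omega)
        (by
          rw [ht]
          rcases Nat.mod_two_eq_zero_or_one j with h | h <;>
            simp [Nat.add_mod, h])
        (by omega) HI.1 HI.2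
    · rw [if_neg hjn]
      intro a b hab hbn
      exact hfill a b hab hbn (by omega)

-- ===== VERDICT (by name: the statement is the Claim_ definition above) =====
theorem pick_up_dp_spec : Claim_equal_pick_up_dp := by
  intro coins _ hpre
  unfold Spec_pick_up_dp pick_up_dp pick_up_dp_alt
  have hn : 1 ≤ coins.length := by
    rcases coins with _ | ⟨x, xs⟩
    · exact absurd rfl hpre
    · simp
  have Init := pvInit_correct coins coins.length
  have HA := pvOuter_correct coins coins.length coins.length 2 true _ (by omega) (by decide)
    (by omega) Init.1 Init.2 0 (coins.length - 1) (by omega) (by omega)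
  have HB := pvGoB_correct coins coins.length 0 (coins.length - 1)
    (pvWarmB coins coins.length PySem.Dict.empty) (by omega) (by omega)
    (pvWarmB_inv coins coins.length PySem.Dict.empty
      (by
        intro i k v h
        rw [PySem.Dict.get?_empty] at h
        exact absurd h (by simp)))
  rw [HA, HB.1]
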